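-- pv_equiv track=rewrite | github.com/nexi-lab/nexus | scripts/gen_metadata.py | _params_to_call_args
-- ===== SOURCE A (Python) =====
-- def _params_to_call_args(params: str) -> str:
--     """Extract argument names from a parameter string for a function call.
--
--     Example: ``"prefix: str = '', recursive: bool = True, **kwargs: Any"``
--     → ``"prefix, recursive, **kwargs"``
--
--     Handles keyword-only marker ``*``: params after bare ``*`` are emitted
--     as ``name=name`` (keyword arguments in the call expression).
--     """
--     if not params:
--         return ""
--     args: list[str] = []
--     keyword_only = False
--     for param in params.split(","):
--         param = param.strip()
--         if not param:
--             continue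
--         # Bare * is the keyword-only separator — skip it, mark subsequent args
--         if param == "*":
--             keyword_only = True
--             continue
--         # Name is everything before ':' or '='
--         name = param.split(":")[0].split("=")[0].strip()
--         if keyword_only and not name.startswith("**"):
--             args.append(f"{name}={name}")
--         else:
--             args.append(name)
--     return ", ".join(args)
-- ===== SOURCE B (Python) =====
-- def _params_to_call_args(params: str) -> str:
--     """Split once on commas, partition at the first bare '*', and map the
--     positional and keyword-only groups separately."""
--     if not params:
--         return ""
--     items = [p.strip() for p in params.split(",")]
--     star = items.index("*") if "*" in items else None
--     pos = items if star is None else items[:star]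
--     kw = [] if star is None else items[star + 1:]
--     name = lambda p: p.split(":")[0].split("=")[0].strip()
--     out = [name(p) for p in pos if p and p != "*"]
--     out += [n if n.startswith("**") else f"{n}={n}"
--             for p in kw if p and p != "*"
--             for n in [name(p)]]
--     return ", ".join(out)
-- ===== Notes on version B (the rewrite author's own statement) =====
-- stated objective: alternative
-- what changed: Replaces A's single loop with a mutable keyword_only flag by a flag-free decomposition: strip all comma-split entries once, partition the list at the first keyword-only separator entry via index/slices, and map the positional and keyword-only groups with two separate comprehensions.
import Mathlib
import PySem

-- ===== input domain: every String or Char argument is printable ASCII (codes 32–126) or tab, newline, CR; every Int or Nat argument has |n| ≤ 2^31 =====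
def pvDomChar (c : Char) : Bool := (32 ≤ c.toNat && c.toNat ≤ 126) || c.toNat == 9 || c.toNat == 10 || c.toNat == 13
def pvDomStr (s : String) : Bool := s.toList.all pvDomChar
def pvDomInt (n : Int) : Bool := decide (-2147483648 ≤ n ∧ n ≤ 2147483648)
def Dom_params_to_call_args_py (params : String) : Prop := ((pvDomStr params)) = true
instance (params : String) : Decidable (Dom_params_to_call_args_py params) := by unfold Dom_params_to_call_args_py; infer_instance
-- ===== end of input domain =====

-- B partitions the comma-split list once at the first bare '*' and maps the two groups separately,
-- instead of A's stateful keyword_only flag threaded through one loop (objective: alternative decomposition).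

-- s.split(sep) for a non-empty literal sep (exact there: split? is none only for sep = "")
def pvSplit (s sep : String) : List String := (PySem.Str.split? s sep).getD []

-- ===== PORT A =====
-- name = param.split(":")[0].split("=")[0].strip()
def pvName (p : String) : String :=
  PySem.Str.strip ((pvSplit ((pvSplit p ":").headD "") "=").headD "")

def pvStepA (st : List String × Bool) (param0 : String) : List String × Bool :=
  let param := PySem.Str.strip param0
  if param = "" then st
  else if param = "*" then (st.1, true)
  else
    let name := pvName param
    if st.2 && !(PySem.Str.startswith name "**") then (st.1 ++ [name ++ "=" ++ name], st.2)
    else (st.1 ++ [name], st.2)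

def params_to_call_args_py (params : String) : String :=
  if params = "" then ""
  else
    let r := (pvSplit params ",").foldl pvStepA ([], false)
    PySem.Str.join ", " r.1

-- ===== PORT B =====
def pvKeep (p : String) : Bool := !(p == "") && !(p == "*")

def pvKwEmit (p : String) : String :=
  let n := pvName p
  if PySem.Str.startswith n "**" then n else n ++ "=" ++ n

def params_to_call_args_py_alt (params : String) : String :=
  if params = "" then ""
  else
    let items := (pvSplit params ",").map PySem.Str.strip
    let star := PySem.List.index? items "*"
    let pos := match star with
      | none => items
      | some i => PySem.List.slice items none (some (i : Int))
    let kw : List String := match star with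
      | none => []
      | some i => PySem.List.slice items (some ((i : Int) + 1)) none
    let out := (pos.filter pvKeep).map pvName ++ (kw.filter pvKeep).map pvKwEmit
    PySem.Str.join ", " out

-- ===== PRECONDITION & SPEC =====
def Spec_params_to_call_args_py (params : String) (out : String) : Prop := out = params_to_call_args_py_alt params
instance (params : String) (out : String) : Decidable (Spec_params_to_call_args_py params out) := by unfold Spec_params_to_call_args_py; infer_instance

-- ===== CLAIM (what is proved, stated in full; the proofs are below) =====
def Claim_equal_params_to_call_args_py : Prop := ∀ (params : String), Dom_params_to_call_args_py params → Spec_params_to_call_args_py params (params_to_call_args_py params)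

-- ===== LEMMAS AND PROOFS =====

-- A's step only depends on the stripped entry
def pvStepA' (st : List String × Bool) (q : String) : List String × Bool :=
  if q = "" then st
  else if q = "*" then (st.1, true)
  else
    let name := pvName q
    if st.2 && !(PySem.Str.startswith name "**") then (st.1 ++ [name ++ "=" ++ name], st.2)
    else (st.1 ++ [name], st.2)

lemma foldA_map (l : List String) (st : List String × Bool) :
    l.foldl pvStepA st = (l.map PySem.Str.strip).foldl pvStepA' st := by
  rw [List.foldl_map]; rfl

-- keyword-only phase
lemma foldA_true (items : List String) (acc : List String) :
    items.foldl pvStepA' (acc, true) = (acc ++ (items.filter pvKeep).map pvKwEmit, true) := by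
  induction items generalizing acc with
  | nil => simp
  | cons p rest ih =>
    by_cases h0 : p = ""
    · simp [h0, pvStepA', pvKeep, ih]
    · by_cases h1 : p = "*"
      · simp [h1, pvStepA', pvKeep, ih]
      · cases hsw : PySem.Str.startswith (pvName p) "**" <;>
        · simp at hsw
          simp [pvStepA', hsw, ih, pvKeep, h0, h1, pvKwEmit]

-- positional phase (no '*' in the list)
lemma foldA_false (items : List String) (acc : List String) (h : "*" ∉ items) :
    items.foldl pvStepA' (acc, false) = (acc ++ (items.filter pvKeep).map pvName, false) := by
  induction items generalizing acc with
  | nil => simp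
  | cons p rest ih =>
    have hp : p ≠ "*" := fun hh => h (hh ▸ List.mem_cons_self ..)
    have hr : "*" ∉ rest := fun hh => h (List.mem_cons_of_mem _ hh)
    have ih' := fun acc => ih acc hr
    by_cases h0 : p = ""
    · simp [h0, pvStepA', pvKeep, ih']
    · simp [pvStepA', ih', pvKeep, h0, hp]

lemma main_eq (items : List String) :
    (items.foldl pvStepA' ([], false)).1 =
      (match PySem.List.index? items "*" with
        | none => (items.filter pvKeep).map pvName
        | some i => ((PySem.List.slice items none (some (i : Int))).filter pvKeep).map pvName
            ++ ((PySem.List.slice items (some ((i : Int) + 1)) none).filter pvKeep).map pvKwEmit) := by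
  cases hidx : PySem.List.index? items "*" with
  | none =>
    have hmem : "*" ∉ items := (PySem.List.index?_eq_none_iff ..).mp hidx
    simp [foldA_false items [] hmem]
  | some i =>
    obtain ⟨pre, suf, hsplit, hlen, hnot⟩ := (PySem.List.index?_eq_some_iff ..).mp hidx
    subst hsplit
    have h1 : PySem.List.slice (pre ++ "*" :: suf) none (some ((i : Int))) = pre := by
      rw [PySem.List.slice_to_natCast, ← hlen, List.take_left]
    have h2 : PySem.List.slice (pre ++ "*" :: suf) (some ((i : Int) + 1)) none = suf := by
      have hc : ((i : Int) + 1) = ((i + 1 : Nat) : Int) := by push_cast; ring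
      rw [hc, PySem.List.slice_from_natCast, ← hlen]
      simp [List.drop_append]
    have hstar : pvStepA' ((pre.filter pvKeep).map pvName, false) "*" =
        ((pre.filter pvKeep).map pvName, true) := by simp [pvStepA']
    rw [List.foldl_append, foldA_false pre [] hnot, List.foldl_cons]
    simp only [List.nil_append] at hstar ⊢
    rw [hstar, foldA_true]
    simp [h1, h2]

-- ===== VERDICT (by name: the statement is the Claim_ definition above) =====
theorem params_to_call_args_py_spec : Claim_equal_params_to_call_args_py := by
  intro params _
  unfold Spec_params_to_call_args_py params_to_call_args_py params_to_call_args_py_alt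
  by_cases h : params = ""
  · simp [h]
  · simp only [if_neg h]
    rw [foldA_map, main_eq]
    cases PySem.List.index? ((pvSplit params ",").map PySem.Str.strip) "*" <;> simp
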